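-- pv_equiv track=rewrite | github.com/amilkyboi/moc | src/test/expansion_fan.py | find_rght_chars
-- ===== SOURCE A (Python) =====
-- N_LINES:    int   = 25
--
-- def find_rght_chars(num: int) -> list[int]:
--     '''
--     Finds the indices of the points that lie on each right-running characteristic by finding the
--     triangular sequence of the input number.
--
--     Args:
--         num (int): characteristic point index
--
--     Returns:
--         list[int]: triangular sequence corresponding to the index of the input point
--     '''
--
--     sequence  = []
--     start     = num
--     increment = N_LINES - 1
--
--     for _ in range(num):
--         sequence.append(start)
--         start += increment
--         increment -= 1
--
--     return sequence
-- ===== SOURCE B (Python) =====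
-- N_LINES: int = 25
--
-- def find_rght_chars(num: int) -> list[int]:
--     # closed form: element i equals num + i*(N_LINES-1) - i*(i-1)//2
--     return [num + i * (N_LINES - 1) - i * (i - 1) // 2 for i in range(num)]
-- ===== Notes on version B (the rewrite author's own statement) =====
-- stated objective: simpler
-- what changed: Replaced the running start/increment accumulator loop by a closed-form comprehension computing each element independently from its index.
import Mathlib
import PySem

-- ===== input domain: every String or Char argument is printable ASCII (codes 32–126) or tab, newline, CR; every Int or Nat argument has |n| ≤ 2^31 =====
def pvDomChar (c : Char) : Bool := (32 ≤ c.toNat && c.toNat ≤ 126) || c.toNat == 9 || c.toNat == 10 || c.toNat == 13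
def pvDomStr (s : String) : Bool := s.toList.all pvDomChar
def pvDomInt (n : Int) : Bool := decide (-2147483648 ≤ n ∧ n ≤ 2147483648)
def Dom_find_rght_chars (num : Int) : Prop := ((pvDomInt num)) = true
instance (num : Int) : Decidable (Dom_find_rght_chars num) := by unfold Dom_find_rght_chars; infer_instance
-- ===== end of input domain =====

-- B replaces A's running start/increment accumulator by a closed-form per-index formula (simpler).

-- ===== PORT A =====
-- N_LINES = 25 inlined as the constant 25
def find_rght_chars (num : Int) : List Int :=
  let st := (PySem.List.pyRange 0 num 1).foldl
    (fun (s : List Int × Int × Int) _ => (s.1 ++ [s.2.1], s.2.1 + s.2.2, s.2.2 - 1))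
    ([], num, 25 - 1)
  st.1

-- ===== PORT B =====
def find_rght_chars_alt (num : Int) : List Int :=
  (PySem.List.pyRange 0 num 1).map
    (fun i => num + i * (25 - 1) - PySem.Int.floordiv (i * (i - 1)) 2)

-- ===== PRECONDITION & SPEC =====
def Spec_find_rght_chars (num : Int) (out : List Int) : Prop := out = find_rght_chars_alt num
instance (num : Int) (out : List Int) : Decidable (Spec_find_rght_chars num out) := by unfold Spec_find_rght_chars; infer_instance

-- ===== CLAIM (what is proved, stated in full; the proofs are below) =====
def Claim_equal_find_rght_chars : Prop := ∀ (num : Int), Dom_find_rght_chars num → Spec_find_rght_chars num (find_rght_chars num)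

-- ===== LEMMAS AND PROOFS =====

-- T n = n*(n-1)/2, the amount subtracted from s + n*d after n steps
def triA : Nat → Int
  | 0 => 0
  | n + 1 => triA n + n

lemma two_mul_triA (n : Nat) : 2 * triA n = (n : Int) * ((n : Int) - 1) := by
  induction n with
  | zero => simp [triA]
  | succ n ih => simp only [triA]; push_cast; ring_nf; ring_nf at ih; omega

lemma floordiv_triA (n : Nat) :
    PySem.Int.floordiv ((n : Int) * ((n : Int) - 1)) 2 = triA n := by
  rw [← two_mul_triA, PySem.Int.floordiv_eq_ediv_of_pos (by norm_num)]
  omega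

lemma loopA (n : Nat) (acc : List Int) (s d : Int) :
    (List.range n).foldl
      (fun (st : List Int × Int × Int) _ => (st.1 ++ [st.2.1], st.2.1 + st.2.2, st.2.2 - 1))
      (acc, s, d)
    = (acc ++ (List.range n).map (fun k => s + k * d - triA k),
       s + n * d - triA n, d - n) := by
  induction n with
  | zero => simp [triA]
  | succ n ih =>
    rw [List.range_succ, List.foldl_append, List.map_append, ih]
    simp only [List.foldl_cons, List.foldl_nil, List.map_cons, List.map_nil,
      List.append_assoc, triA, Prod.mk.injEq]
    refine ⟨trivial, ?_, ?_⟩ <;> push_cast <;> ring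

-- ===== VERDICT (by name: the statement is the Claim_ definition above) =====
theorem find_rght_chars_spec : Claim_equal_find_rght_chars := by
  intro num _
  unfold Spec_find_rght_chars find_rght_chars find_rght_chars_alt
  rw [PySem.List.pyRange_one]
  simp only [List.foldl_map, List.map_map, zero_add, Int.sub_zero]
  rw [loopA]
  simp only [List.nil_append]
  refine List.map_congr_left fun k _ => ?_
  simp only [Function.comp]
  rw [floordiv_triA]
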